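-- pv_equiv track=rewrite | github.com/jano31415/codejam | meta_hacker_cup/y2023/round0/probc.py | check_apple_sum
-- ===== SOURCE A (Python) =====
-- def check_apple_sum(apple_sum, apples, new_apple):
--     apple_dict = {}
--     # apples.append(new_apple)
--     for a in apples:
--         if a not in apple_dict:
--             apple_dict[a] = 0
--         apple_dict[a] += 1
--     if new_apple not in apple_dict:
--         apple_dict[new_apple] = 0
--     apple_dict[new_apple] += 1
--     for k in apple_dict:
--         if apple_dict[k] != apple_dict.get(apple_sum - k, -1):
--             return -1
--     return new_apple
-- ===== SOURCE B (Python) =====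
-- def check_apple_sum(apple_sum, apples, new_apple):
--     s = sorted(apples + [new_apple])
--     if all(x + y == apple_sum for x, y in zip(s, reversed(s))):
--         return new_apple
--     return -1
-- ===== Notes on version B (the rewrite author's own statement) =====
-- stated objective: simpler
-- what changed: Replaced the frequency-dictionary with mirror-key lookups by sorting the combined list once and checking that opposite ends pairwise sum to apple_sum.
import Mathlib
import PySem

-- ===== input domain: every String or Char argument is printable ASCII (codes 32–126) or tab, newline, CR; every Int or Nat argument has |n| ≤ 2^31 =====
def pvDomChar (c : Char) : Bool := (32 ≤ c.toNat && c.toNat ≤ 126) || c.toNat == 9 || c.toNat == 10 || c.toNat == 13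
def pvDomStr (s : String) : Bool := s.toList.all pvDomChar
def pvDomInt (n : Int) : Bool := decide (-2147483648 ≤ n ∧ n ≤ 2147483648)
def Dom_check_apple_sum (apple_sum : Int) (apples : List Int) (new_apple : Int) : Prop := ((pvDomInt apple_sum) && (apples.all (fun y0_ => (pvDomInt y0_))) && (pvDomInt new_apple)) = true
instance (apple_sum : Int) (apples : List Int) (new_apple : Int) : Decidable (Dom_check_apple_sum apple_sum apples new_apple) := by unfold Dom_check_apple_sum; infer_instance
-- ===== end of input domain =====

-- B replaces A's frequency dictionary + mirror-key lookups by one sort and an opposite-ends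
-- pairwise-sum check: simpler and shorter, same exact result (return value only; neither mutates).

-- ===== PORT A =====
-- one iteration of A's loops: 'if a not in apple_dict: apple_dict[a] = 0' then 'apple_dict[a] += 1'
-- (after the conditional insert the key is present, so getD reads the stored value, exactly Python's d[a])
def pvAStep (d : PySem.Dict Int Int) (a : Int) : PySem.Dict Int Int :=
  let d1 := if d.contains a then d else d.insert a 0
  d1.insert a (d1.getD a 0 + 1)

def check_apple_sum (apple_sum : Int) (apples : List Int) (new_apple : Int) : Int :=
  let d0 := apples.foldl pvAStep PySem.Dict.empty
  let d := pvAStep d0 new_apple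
  -- 'for k in apple_dict: if apple_dict[k] != apple_dict.get(apple_sum - k, -1): return -1'
  -- (k is a key of d, so d.getD k 0 is Python's d[k]; the early return is the first mismatch = any)
  if d.keys.any (fun k => decide (d.getD k 0 ≠ d.getD (apple_sum - k) (-1))) then -1 else new_apple

-- ===== PORT B =====
def check_apple_sum_alt (apple_sum : Int) (apples : List Int) (new_apple : Int) : Int :=
  let s := PySem.List.sorted (apples ++ [new_apple]) (fun x => x)
  if (s.zip s.reverse).all (fun p => decide (p.1 + p.2 = apple_sum)) then new_apple else -1

-- ===== PRECONDITION & SPEC =====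
def Spec_check_apple_sum (apple_sum : Int) (apples : List Int) (new_apple : Int) (out : Int) : Prop := out = check_apple_sum_alt apple_sum apples new_apple
instance (apple_sum : Int) (apples : List Int) (new_apple : Int) (out : Int) : Decidable (Spec_check_apple_sum apple_sum apples new_apple out) := by unfold Spec_check_apple_sum; infer_instance

-- ===== CLAIM (what is proved, stated in full; the proofs are below) =====
def Claim_equal_check_apple_sum : Prop := ∀ (apple_sum : Int) (apples : List Int) (new_apple : Int), Dom_check_apple_sum apple_sum apples new_apple → Spec_check_apple_sum apple_sum apples new_apple (check_apple_sum apple_sum apples new_apple)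

-- ===== LEMMAS AND PROOFS =====

-- A's conditional-insert-then-increment step is the plain counting step.
theorem pvAStep_eq (d : PySem.Dict Int Int) (a : Int) :
    pvAStep d a = d.insert a (d.getD a 0 + 1) := by
  unfold pvAStep
  by_cases h : d.contains a
  · simp [h]
  · simp only [Bool.not_eq_true] at h
    simp only [h, Bool.false_eq_true, if_false]
    rw [PySem.Dict.getD_insert_self, PySem.Dict.getD_of_not_contains d 0 h]
    apply PySem.Dict.ext
    rw [PySem.Dict.items_insert_of_contains, PySem.Dict.items_insert_of_not_contains d 0 h,
        PySem.Dict.items_insert_of_not_contains d _ h]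
    · rw [List.map_append]
      congr 1
      · have hfun : ∀ p ∈ d.items,
            (fun p : Int × Int => if p.1 == a then (a, (0 : Int) + 1) else p) p = id p := by
          intro p hp
          have hne : ¬ ((p.1 == a) = true) := by
            intro hb
            have hmem := PySem.Dict.contains_iff_mem_keys (d := d) (k := a) |>.2
            simp only [PySem.Dict.keys] at hmem
            rw [hmem (List.mem_map.2 ⟨p, hp, by simpa using hb⟩)] at h
            simp at h
          simp [hne]
        rw [List.map_congr_left hfun, List.map_id]
      · simp
    · exact PySem.Dict.contains_insert_self d a 0

-- the dictionary A builds is Counter(apples + [new_apple])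
theorem pvDict_eq (apples : List Int) (new_apple : Int) :
    pvAStep (apples.foldl pvAStep PySem.Dict.empty) new_apple
      = PySem.Dict.counter (apples ++ [new_apple]) := by
  have hstep : pvAStep = fun d a => d.insert a (d.getD a 0 + 1) := funext₂ pvAStep_eq
  rw [hstep, ← PySem.Dict.foldl_insert_getD_add_one_eq_counter, List.foldl_append,
      List.foldl_cons, List.foldl_nil]

-- counter lookup with an arbitrary default
theorem pvCounterGetD (L : List Int) (v : Int) (d0 : Int) :
    (PySem.Dict.counter L).getD v d0 = if v ∈ L then ((L.count v : Int)) else d0 := by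
  by_cases hv : v ∈ L
  · have hc : (PySem.Dict.counter L).contains v = true := by
      rw [PySem.Dict.contains_counter]; simpa using hv
    rw [PySem.Dict.contains_eq_isSome_get?] at hc
    obtain ⟨w, hw⟩ := Option.isSome_iff_exists.1 hc
    have h0 := PySem.Dict.getD_of_get?_eq_some (PySem.Dict.counter L) (0 : Int) hw
    rw [PySem.Dict.getD_counter] at h0
    rw [PySem.Dict.getD_of_get?_eq_some (PySem.Dict.counter L) d0 hw, h0, if_pos hv]
  · have hc : (PySem.Dict.counter L).contains v = false := by
      rw [PySem.Dict.contains_counter]; simpa using hv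
    rw [PySem.Dict.getD_of_not_contains _ _ hc, if_neg hv]

-- A's mismatch scan succeeds exactly on count-symmetric multisets
theorem pvA_any (S : Int) (L : List Int) :
    ((PySem.Dict.counter L).keys.any
        (fun k => decide ((PySem.Dict.counter L).getD k 0 ≠ (PySem.Dict.counter L).getD (S - k) (-1))) = false)
      ↔ (∀ k ∈ L, L.count (S - k) = L.count k) := by
  rw [← Bool.not_eq_true, List.any_eq_true]
  simp only [PySem.Dict.keys_counter, PySem.Set.mem_ofList, decide_eq_true_eq, not_exists, not_and, not_not]
  constructor
  · intro h k hk
    have := h k hk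
    rw [pvCounterGetD, pvCounterGetD, if_pos hk] at this
    by_cases hm : S - k ∈ L
    · rw [if_pos hm] at this; exact_mod_cast this.symm
    · rw [if_neg hm] at this
      have hpos : 0 < L.count k := List.count_pos_iff.2 hk
      omega
  · intro h k hk
    rw [pvCounterGetD, pvCounterGetD, if_pos hk]
    have hsym := h k hk
    have hpos : 0 < L.count k := List.count_pos_iff.2 hk
    have hm : S - k ∈ L := by
      rw [← List.count_pos_iff]; omega
    rw [if_pos hm, hsym]

-- count symmetry on members extends to all values
theorem pvSym_all (S : Int) (L : List Int)
    (h : ∀ k ∈ L, L.count (S - k) = L.count k) (k : Int) :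
    L.count (S - k) = L.count k := by
  by_cases hk : k ∈ L
  · exact h k hk
  · have h0 : L.count k = 0 := List.count_eq_zero.2 hk
    by_cases hm : S - k ∈ L
    · have := h (S - k) hm
      rw [show S - (S - k) = k by ring] at this
      omega
    · rw [h0, List.count_eq_zero.2 hm]

-- the sorted mirror list
theorem pvMirror_eq (S : Int) (L : List Int)
    (h : ∀ k ∈ L, L.count (S - k) = L.count k) :
    (PySem.List.sorted L (fun x => x)).reverse.map (fun y => S - y)
      = PySem.List.sorted L (fun x => x) := by
  set s := PySem.List.sorted L (fun x => x) with hs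
  have hperm : s.Perm L := PySem.List.sorted_perm L (fun x => x) false
  have hinj : Function.Injective (fun y : Int => S - y) := fun a b hab => by
    simpa using hab
  have hall : ∀ k, s.count (S - k) = s.count k := by
    intro k
    rw [hperm.count_eq, hperm.count_eq]
    exact pvSym_all S L h k
  have hpermt : (s.reverse.map (fun y => S - y)).Perm s := by
    rw [List.perm_iff_count]
    intro k
    have : k = S - (S - k) := by ring
    rw [this, List.count_map_of_injective _ _ hinj, List.count_reverse]
    rw [← this, hall]
  have hsorted : s.Pairwise (fun a b => a ≤ b) := by
    have := PySem.List.sorted_pairwise L (fun x : Int => x)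
    simpa using this
  have htsorted : (s.reverse.map (fun y => S - y)).Pairwise (fun a b : Int => a ≤ b) := by
    rw [List.pairwise_map, List.pairwise_reverse]
    exact hsorted.imp (by intro a b hab; simp; omega)
  exact List.Perm.eq_of_pairwise
    (fun a b _ _ h1 h2 => le_antisymm h1 h2) htsorted hsorted hpermt

-- B's opposite-ends check holds iff the sorted list equals its mirror
theorem pvB_all (S : Int) (L : List Int) :
    ((PySem.List.sorted L (fun x => x)).zip (PySem.List.sorted L (fun x => x)).reverse).all
        (fun p => decide (p.1 + p.2 = S)) = true
      ↔ (PySem.List.sorted L (fun x => x)).reverse.map (fun y => S - y)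
          = PySem.List.sorted L (fun x => x) := by
  set s := PySem.List.sorted L (fun x => x) with hs
  rw [List.all_eq_true]
  constructor
  · intro h
    apply List.ext_getElem
    · simp
    · intro i h1 h2
      have hz : i < (s.zip s.reverse).length := by
        rw [List.length_zip]; simp; omega
      have := h _ (List.getElem_mem hz)
      rw [List.getElem_zip] at this
      simp only [decide_eq_true_eq] at this
      simp only [List.getElem_map]
      omega
  · intro h p hp
    obtain ⟨i, hi, hp⟩ := List.mem_iff_getElem.1 hp
    rw [List.getElem_zip] at hp
    have h1 : i < s.length := by simpa using (lt_of_lt_of_le hi (by simp [List.length_zip]))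
    have h2 : i < s.reverse.length := by simpa using h1
    have := congrArg (fun l => l[i]?) h
    simp only [List.getElem?_map] at this
    rw [List.getElem?_eq_getElem h2, List.getElem?_eq_getElem h1] at this
    simp only [Option.map_some] at this
    rw [← hp]
    simp only [decide_eq_true_eq]
    have : S - s.reverse[i] = s[i] := by simpa using this
    omega

-- the mirror equality gives count symmetry on members
theorem pvMirror_sym (S : Int) (L : List Int)
    (h : (PySem.List.sorted L (fun x => x)).reverse.map (fun y => S - y)
          = PySem.List.sorted L (fun x => x)) :
    ∀ k ∈ L, L.count (S - k) = L.count k := by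
  intro k hk
  set s := PySem.List.sorted L (fun x => x) with hs
  have hperm : s.Perm L := PySem.List.sorted_perm L (fun x => x) false
  have hinj : Function.Injective (fun y : Int => S - y) := fun a b hab => by simpa using hab
  have hmap : (s.reverse.map (fun y => S - y)).count k = s.reverse.count (S - k) := by
    have := List.count_map_of_injective s.reverse _ hinj (S - k)
    simpa [show S - (S - k) = k from by ring] using this
  have hc := congrArg (fun l => l.count k) h
  simp only at hc
  calc L.count (S - k) = s.count (S - k) := (hperm.count_eq (S - k)).symm
    _ = s.reverse.count (S - k) := by rw [List.count_reverse]
    _ = (s.reverse.map (fun y => S - y)).count k := hmap.symm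
    _ = s.count k := hc
    _ = L.count k := hperm.count_eq k

-- ===== VERDICT (by name: the statement is the Claim_ definition above) =====
theorem check_apple_sum_spec : Claim_equal_check_apple_sum := by
  intro S apples new_apple _
  unfold Spec_check_apple_sum
  simp only [check_apple_sum, check_apple_sum_alt]
  rw [pvDict_eq]
  by_cases hP : ∀ k ∈ apples ++ [new_apple],
      (apples ++ [new_apple]).count (S - k) = (apples ++ [new_apple]).count k
  · rw [if_neg, if_pos]
    · exact (pvB_all S (apples ++ [new_apple])).2 (pvMirror_eq S (apples ++ [new_apple]) hP)
    · rw [(pvA_any S (apples ++ [new_apple])).2 hP]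
      simp
  · rw [if_pos, if_neg]
    · intro hB
      exact hP (pvMirror_sym S (apples ++ [new_apple])
        ((pvB_all S (apples ++ [new_apple])).1 hB))
    · by_contra hA
      exact absurd ((pvA_any S (apples ++ [new_apple])).1 (Bool.eq_false_iff.mpr hA)) hP
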